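-- pv_equiv track=rewrite | github.com/s3000-f/Graph | Subgraphs/g23.py | internal
-- ===== SOURCE A (Python) =====
-- def internal(graph):
--     siz = len(graph)
--     cnt = 0
--     for i in range(0, siz):
--         for j in range(0, siz):
--             for k in range(0, siz):
--                 for l in range(0, siz):
--                     for m in range(0, siz):
--                         if (i != j and i != k and i != l and i != m and j != k
--                                 and j != l and j != m and k != l and k != m and l != m):
--                             if (graph[i][j] == 1 and graph[i][k] == 1 and graph[i][l] == 1 and
--                                     graph[i][m] == 1 and graph[k][l] == 1 and graph[k][m] == 1
--                                     and graph[l][m] == 1):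
--                                 cnt += 1
--     return cnt
-- ===== SOURCE B (Python) =====
-- def _nbrs(graph, i):
--     return [v for v in range(len(graph)) if v != i and graph[i][v] == 1]
--
-- def internal(graph):
--     n = len(graph)
--     if n < 5:
--         return 0
--     total = 0
--     for i in range(n):
--         nbrs = _nbrs(graph, i)
--         d = len(nbrs)
--         for k in nbrs:
--             for l in nbrs:
--                 if l != k and graph[k][l] == 1:
--                     for m in nbrs:
--                         if m != k and m != l and graph[k][m] == 1 and graph[l][m] == 1:
--                             total += d - 3
--     return total
-- ===== Notes on version B (the rewrite author's own statement) =====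
-- stated objective: faster
-- what changed: Instead of scanning all n^5 ordered vertex quintuples, B builds each center i's out-neighbor list once, enumerates ordered directed triangles (k,l,m) inside it, and counts the remaining leaf choices in closed form as len(nbrs)-3.
import Mathlib
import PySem

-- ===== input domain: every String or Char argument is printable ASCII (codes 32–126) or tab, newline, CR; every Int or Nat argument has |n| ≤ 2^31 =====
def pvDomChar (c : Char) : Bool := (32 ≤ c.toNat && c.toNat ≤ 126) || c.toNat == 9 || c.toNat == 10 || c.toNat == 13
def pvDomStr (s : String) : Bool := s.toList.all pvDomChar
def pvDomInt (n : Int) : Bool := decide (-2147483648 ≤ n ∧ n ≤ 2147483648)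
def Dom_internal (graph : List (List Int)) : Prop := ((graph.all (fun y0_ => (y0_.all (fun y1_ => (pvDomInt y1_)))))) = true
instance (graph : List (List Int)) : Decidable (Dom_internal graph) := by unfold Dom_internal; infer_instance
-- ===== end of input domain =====

-- B counts each labeled pattern per center vertex i from i's out-neighbor list (ordered directed
-- triangles (k,l,m) among the neighbors, times len(nbrs)-3 choices of the leaf j) instead of
-- scanning all ordered quintuples; measurably faster (O(n^3+n^2) vs O(n^5)).

-- ===== PORT A =====
-- graph[a][b]; exact for 0 ≤ a, b < len(graph) (guaranteed by Pre_internal)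
def pvAt (graph : List (List Int)) (a b : Int) : Int :=
  PySem.List.pyGetD (PySem.List.pyGetD graph a []) b 0

-- Python A's local 'siz' is inlined as (graph.length : Int)
def internal (graph : List (List Int)) : Int :=
  (PySem.List.pyRange 0 (graph.length : Int) 1).foldl (fun cnt i =>
    (PySem.List.pyRange 0 (graph.length : Int) 1).foldl (fun cnt j =>
      (PySem.List.pyRange 0 (graph.length : Int) 1).foldl (fun cnt k =>
        (PySem.List.pyRange 0 (graph.length : Int) 1).foldl (fun cnt l =>
          (PySem.List.pyRange 0 (graph.length : Int) 1).foldl (fun cnt m =>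
            if i ≠ j ∧ i ≠ k ∧ i ≠ l ∧ i ≠ m ∧ j ≠ k ∧ j ≠ l ∧ j ≠ m ∧ k ≠ l ∧ k ≠ m ∧ l ≠ m then
              if pvAt graph i j = 1 ∧ pvAt graph i k = 1 ∧ pvAt graph i l = 1 ∧
                  pvAt graph i m = 1 ∧ pvAt graph k l = 1 ∧ pvAt graph k m = 1 ∧
                  pvAt graph l m = 1 then
                cnt + 1
              else cnt
            else cnt) cnt) cnt) cnt) cnt) 0

-- ===== PORT B =====
-- Source B's helper _nbrs(graph, i)
def pvNbrs (graph : List (List Int)) (i : Int) : List Int :=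
  (PySem.List.pyRange 0 (graph.length : Int) 1).filter
    (fun v => decide (v ≠ i ∧ pvAt graph i v = 1))

-- Source B's locals 'nbrs' and 'd' are inlined as pvNbrs graph i / its length
def internal_alt (graph : List (List Int)) : Int :=
  if (graph.length : Int) < 5 then 0
  else
    (PySem.List.pyRange 0 (graph.length : Int) 1).foldl (fun total i =>
      (pvNbrs graph i).foldl (fun total k =>
        (pvNbrs graph i).foldl (fun total l =>
          if l ≠ k ∧ pvAt graph k l = 1 then
            (pvNbrs graph i).foldl (fun total m =>
              if m ≠ k ∧ m ≠ l ∧ pvAt graph k m = 1 ∧ pvAt graph l m = 1 then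
                total + (((pvNbrs graph i).length : Int) - 3)
              else total) total
          else total) total) total) 0

-- ===== PRECONDITION & SPEC =====
-- Pre_ excludes graphs with ≥ 5 rows in which some row is shorter than the number of rows:
-- there the row indexing graph[x][y] (x ≠ y < len(graph)) can raise IndexError in both programs.
def Pre_internal (graph : List (List Int)) : Prop :=
  graph.length ≤ 4 ∨ ∀ row ∈ graph, graph.length ≤ row.length
instance (graph : List (List Int)) : Decidable (Pre_internal graph) := by
  unfold Pre_internal; infer_instance

def pvWitness_internal : List (List Int) :=
  [[0, 1, 1, 1, 1], [0, 0, 1, 1, 1], [0, 0, 0, 1, 1], [0, 0, 0, 0, 1], [1, 0, 0, 0, 0]]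

def Spec_internal (graph : List (List Int)) (out : Int) : Prop := out = internal_alt graph
instance (graph : List (List Int)) (out : Int) : Decidable (Spec_internal graph out) := by
  unfold Spec_internal; infer_instance

-- ===== CLAIM (what is proved, stated in full; the proofs are below) =====
def Claim_equal_internal : Prop :=
  ∀ (graph : List (List Int)), Dom_internal graph → Pre_internal graph →
    Spec_internal graph (internal graph)

-- ===== LEMMAS AND PROOFS =====

-- abbreviation for range(len(graph)) used throughout the proofs
def pvRg (graph : List (List Int)) : List Int :=
  PySem.List.pyRange 0 (graph.length : Int) 1

-- the 0/1 summand of A's quintuple scan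
def indA (graph : List (List Int)) (i j k l m : Int) : Int :=
  if i ≠ j ∧ i ≠ k ∧ i ≠ l ∧ i ≠ m ∧ j ≠ k ∧ j ≠ l ∧ j ≠ m ∧ k ≠ l ∧ k ≠ m ∧ l ≠ m then
    if pvAt graph i j = 1 ∧ pvAt graph i k = 1 ∧ pvAt graph i l = 1 ∧
        pvAt graph i m = 1 ∧ pvAt graph k l = 1 ∧ pvAt graph k m = 1 ∧
        pvAt graph l m = 1 then 1
    else 0
  else 0

-- the summand of B's triangle scan (d = number of neighbours of the center)
def indB (graph : List (List Int)) (d k l m : Int) : Int :=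
  if l ≠ k ∧ pvAt graph k l = 1 then
    if m ≠ k ∧ m ≠ l ∧ pvAt graph k m = 1 ∧ pvAt graph l m = 1 then d - 3 else 0
  else 0

def sumA (graph : List (List Int)) (i : Int) : Int :=
  ((pvRg graph).map fun j => ((pvRg graph).map fun k => ((pvRg graph).map fun l =>
    ((pvRg graph).map fun m => indA graph i j k l m).sum).sum).sum).sum

def sumB (graph : List (List Int)) (i : Int) : Int :=
  ((pvNbrs graph i).map fun k => ((pvNbrs graph i).map fun l =>
    ((pvNbrs graph i).map fun m =>
      indB graph ((pvNbrs graph i).length : Int) k l m).sum).sum).sum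

lemma foldl_body_add {α : Type} (g : Int → α → Int) (f : α → Int)
    (h : ∀ c x, g c x = c + f x) (xs : List α) (c : Int) :
    xs.foldl g c = c + (xs.map f).sum := by
  induction xs generalizing c with
  | nil => simp
  | cons a t ih => simp [h, ih, add_assoc]

lemma sum_map_congr {xs : List Int} {f g : Int → Int}
    (h : ∀ x ∈ xs, f x = g x) : (xs.map f).sum = (xs.map g).sum := by
  rw [List.map_congr_left h]

lemma sum_map_swap (xs ys : List Int) (f : Int → Int → Int) :
    (xs.map fun a => (ys.map fun b => f a b).sum).sum
      = (ys.map fun b => (xs.map fun a => f a b).sum).sum := by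
  induction xs with
  | nil => simp
  | cons a t ih => simp only [List.map_cons, List.sum_cons, ih, PySem.List.sum_map_add_int]

lemma sum_map_if_filter (p : Int → Prop) [DecidablePred p] (g : Int → Int) (xs : List Int) :
    ((xs.map fun x => if p x then g x else 0)).sum
      = ((xs.filter fun x => decide (p x)).map g).sum := by
  induction xs with
  | nil => simp
  | cons a t ih => by_cases h : p a <;> simp [h, ih]

lemma sum_map_pull (Q : Prop) [Decidable Q] (xs : List Int) (f : Int → Int) :
    (xs.map fun x => if Q then f x else 0).sum = if Q then (xs.map f).sum else 0 := by
  by_cases hq : Q <;> simp [hq]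

lemma sum_map_one (xs : List Int) : (xs.map fun _ => (1 : Int)).sum = xs.length := by
  induction xs with
  | nil => simp
  | cons a t ih => simp; ring

lemma three_le_length {xs : List Int} {k l m : Int} (hk : k ∈ xs) (hl : l ∈ xs) (hm : m ∈ xs)
    (hkl : k ≠ l) (hkm : k ≠ m) (hlm : l ≠ m) : 3 ≤ xs.length := by
  have hsub : ([k, l, m] : List Int).Subperm xs := by
    apply List.subperm_of_subset
    · simp [hkl, hkm, hlm]
    · intro x hx
      simp only [List.mem_cons, List.not_mem_nil, or_false] at hx
      rcases hx with rfl | rfl | rfl <;> assumption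
  simpa using hsub.length_le

lemma filter_ne_length {ys : List Int} {a : Int} (hnd : ys.Nodup) (ha : a ∈ ys) :
    (ys.filter fun j => decide (j ≠ a)).length = ys.length - 1 := by
  induction ys with
  | nil => cases ha
  | cons x t ih =>
    rcases List.mem_cons.mp ha with h | h
    · subst h
      have hnotin : a ∉ t := (List.nodup_cons.mp hnd).1
      have hself : List.filter (fun j => decide (j ≠ a)) t = t :=
        List.filter_eq_self.mpr fun b hb =>
          decide_eq_true fun hba => hnotin (hba ▸ hb)
      rw [List.filter_cons, if_neg (by simp), hself]
      simp
    · have hxa : x ≠ a := fun hh => (List.nodup_cons.mp hnd).1 (hh ▸ h)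
      have ht := ih (List.nodup_cons.mp hnd).2 h
      have hlen : 0 < t.length := List.length_pos_of_mem h
      rw [List.filter_cons, if_pos (decide_eq_true hxa)]
      simp only [List.length_cons]
      omega

lemma count3 {xs : List Int} {k l m : Int} (hnd : xs.Nodup)
    (hk : k ∈ xs) (hl : l ∈ xs) (hm : m ∈ xs)
    (hkl : k ≠ l) (hkm : k ≠ m) (hlm : l ≠ m) :
    (((xs.filter fun j => decide (j ≠ k ∧ j ≠ l ∧ j ≠ m)).length : Int))
      = (xs.length : Int) - 3 := by
  have e : (xs.filter fun j => decide (j ≠ k ∧ j ≠ l ∧ j ≠ m))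
      = ((xs.filter fun j => decide (j ≠ k)).filter fun j => decide (j ≠ l)).filter
          fun j => decide (j ≠ m) := by
    simp only [List.filter_filter]
    apply List.filter_congr
    intro x _
    by_cases h1 : x = k <;> by_cases h2 : x = l <;> by_cases h3 : x = m <;> simp [h1, h2, h3]
  have n1 : (xs.filter fun j => decide (j ≠ k)).Nodup := hnd.filter _
  have m1l : l ∈ xs.filter fun j => decide (j ≠ k) :=
    List.mem_filter.mpr ⟨hl, decide_eq_true hkl.symm⟩
  have m1m : m ∈ xs.filter fun j => decide (j ≠ k) :=
    List.mem_filter.mpr ⟨hm, decide_eq_true hkm.symm⟩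
  have n2 : ((xs.filter fun j => decide (j ≠ k)).filter fun j => decide (j ≠ l)).Nodup :=
    n1.filter _
  have m2m : m ∈ (xs.filter fun j => decide (j ≠ k)).filter fun j => decide (j ≠ l) :=
    List.mem_filter.mpr ⟨m1m, decide_eq_true hlm.symm⟩
  have l1 := filter_ne_length hnd hk
  have l2 := filter_ne_length n1 m1l
  have l3 := filter_ne_length n2 m2m
  have h3 := three_le_length hk hl hm hkl hkm hlm
  rw [e]
  omega

lemma internal_eq (graph : List (List Int)) :
    internal graph = ((pvRg graph).map fun i => sumA graph i).sum := by
  unfold internal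
  refine ((foldl_body_add _ (fun i => sumA graph i) ?_ _ 0).trans (zero_add _))
  intro c i
  refine (foldl_body_add _ ?f1 ?h1 _ c).trans ?e1
  case h1 =>
    intro c j
    refine (foldl_body_add _ ?f2 ?h2 _ c).trans ?e2
    case h2 =>
      intro c k
      refine (foldl_body_add _ ?f3 ?h3 _ c).trans ?e3
      case h3 =>
        intro c l
        refine (foldl_body_add _ ?f4 ?h4 _ c).trans ?e4
        case h4 =>
          intro c m
          show _ = c + indA graph i j k l m
          simp only [indA]; split_ifs <;> omega
        case e4 => rfl
      case e3 => rfl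
    case e2 => rfl
  case e1 => rfl

lemma internal_alt_eq (graph : List (List Int)) (h : ¬ ((graph.length : Int) < 5)) :
    internal_alt graph = ((pvRg graph).map fun i => sumB graph i).sum := by
  unfold internal_alt
  rw [if_neg h]
  refine ((foldl_body_add _ (fun i => sumB graph i) ?_ _ 0).trans (zero_add _))
  intro c i
  refine (foldl_body_add _ ?f1 ?h1 _ c).trans ?e1
  case h1 =>
    intro c k
    refine (foldl_body_add _ ?f2 ?h2 _ c).trans ?e2
    case h2 =>
      intro c l
      by_cases hP : l ≠ k ∧ pvAt graph k l = 1
      · rw [if_pos hP]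
        have hm : (pvNbrs graph i).foldl (fun total m =>
              if m ≠ k ∧ m ≠ l ∧ pvAt graph k m = 1 ∧ pvAt graph l m = 1 then
                total + (((pvNbrs graph i).length : Int) - 3)
              else total) c
            = c + ((pvNbrs graph i).map fun m =>
                if m ≠ k ∧ m ≠ l ∧ pvAt graph k m = 1 ∧ pvAt graph l m = 1 then
                  ((pvNbrs graph i).length : Int) - 3
                else 0).sum :=
          foldl_body_add _ _ (by intro c m; split_ifs <;> ring) _ c
        refine hm.trans ?_
        show c + _ = c + ((pvNbrs graph i).map fun m =>
          indB graph ((pvNbrs graph i).length : Int) k l m).sum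
        congr 1
        refine sum_map_congr fun m _ => ?_
        simp only [indB]
        rw [if_pos hP]
      · rw [if_neg hP]
        show c = c + ((pvNbrs graph i).map fun m =>
          indB graph ((pvNbrs graph i).length : Int) k l m).sum
        have hz : ((pvNbrs graph i).map fun m =>
            indB graph ((pvNbrs graph i).length : Int) k l m)
            = (pvNbrs graph i).map fun _ => (0 : Int) :=
          List.map_congr_left fun m _ => by simp only [indB]; rw [if_neg hP]
        rw [hz]
        simp
    case e2 => rfl
  case e1 => rfl

lemma nbrs_nodup (graph : List (List Int)) (i : Int) : (pvNbrs graph i).Nodup :=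
  (PySem.List.nodup_pyRange_one _ _).filter _

lemma sum3_filter (R N : List Int) (p : Int → Prop) [DecidablePred p]
    (hN : N = R.filter fun x => decide (p x)) (F : Int → Int → Int → Int) :
    (R.map fun k => (R.map fun l => (R.map fun m =>
        if p k then if p l then if p m then F k l m else 0 else 0 else 0).sum).sum).sum
      = (N.map fun k => (N.map fun l => (N.map fun m => F k l m).sum).sum).sum := by
  subst hN
  calc (R.map fun k => (R.map fun l => (R.map fun m =>
        if p k then if p l then if p m then F k l m else 0 else 0 else 0).sum).sum).sum
      = (R.map fun k => if p k then (R.map fun l => (R.map fun m =>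
            if p l then if p m then F k l m else 0 else 0).sum).sum else 0).sum :=
        sum_map_congr fun k _ =>
          (sum_map_congr fun l _ => sum_map_pull _ _ _).trans (sum_map_pull _ _ _)
    _ = ((R.filter fun x => decide (p x)).map fun k => (R.map fun l => (R.map fun m =>
            if p l then if p m then F k l m else 0 else 0).sum).sum).sum :=
        sum_map_if_filter p _ R
    _ = ((R.filter fun x => decide (p x)).map fun k => (R.map fun l =>
            if p l then (R.map fun m => if p m then F k l m else 0).sum else 0).sum).sum :=
        sum_map_congr fun k _ => sum_map_congr fun l _ => sum_map_pull _ _ _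
    _ = ((R.filter fun x => decide (p x)).map fun k =>
            ((R.filter fun x => decide (p x)).map fun l =>
              (R.map fun m => if p m then F k l m else 0).sum).sum).sum :=
        sum_map_congr fun k _ => sum_map_if_filter p _ R
    _ = ((R.filter fun x => decide (p x)).map fun k =>
            ((R.filter fun x => decide (p x)).map fun l =>
              ((R.filter fun x => decide (p x)).map fun m => F k l m).sum).sum).sum :=
        sum_map_congr fun k _ => sum_map_congr fun l _ => sum_map_if_filter p _ R

lemma core (graph : List (List Int)) (i : Int) : sumA graph i = sumB graph i := by
  have hcond : ∀ j k l m : Int, indA graph i j k l m =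
      if k ≠ i ∧ pvAt graph i k = 1 then
        if l ≠ i ∧ pvAt graph i l = 1 then
          if m ≠ i ∧ pvAt graph i m = 1 then
            if k ≠ l ∧ k ≠ m ∧ l ≠ m ∧ pvAt graph k l = 1 ∧ pvAt graph k m = 1 ∧
                pvAt graph l m = 1 then
              if j ≠ i ∧ pvAt graph i j = 1 then
                if j ≠ k ∧ j ≠ l ∧ j ≠ m then 1 else 0
              else 0
            else 0
          else 0
        else 0
      else 0 := by
    intro j k l m
    simp only [indA]
    generalize pvAt graph i j = a
    generalize pvAt graph i k = b
    generalize pvAt graph i l = c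
    generalize pvAt graph i m = d
    generalize pvAt graph k l = e
    generalize pvAt graph k m = f
    generalize pvAt graph l m = g
    split_ifs <;> omega
  -- value of the innermost j-sum, for arbitrary k l m
  have hj : ∀ k l m : Int,
      ((pvRg graph).map fun j => indA graph i j k l m).sum =
        if k ≠ i ∧ pvAt graph i k = 1 then
          if l ≠ i ∧ pvAt graph i l = 1 then
            if m ≠ i ∧ pvAt graph i m = 1 then
              if k ≠ l ∧ k ≠ m ∧ l ≠ m ∧ pvAt graph k l = 1 ∧ pvAt graph k m = 1 ∧
                  pvAt graph l m = 1 then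
                ((pvNbrs graph i).map fun j =>
                  if j ≠ k ∧ j ≠ l ∧ j ≠ m then (1 : Int) else 0).sum
              else 0
            else 0
          else 0
        else 0 := by
    intro k l m
    rw [sum_map_congr fun j _ => hcond j k l m]
    by_cases h1 : k ≠ i ∧ pvAt graph i k = 1
    · simp only [if_pos h1]
      by_cases h2 : l ≠ i ∧ pvAt graph i l = 1
      · simp only [if_pos h2]
        by_cases h3 : m ≠ i ∧ pvAt graph i m = 1
        · simp only [if_pos h3]
          by_cases h4 : k ≠ l ∧ k ≠ m ∧ l ≠ m ∧ pvAt graph k l = 1 ∧ pvAt graph k m = 1 ∧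
              pvAt graph l m = 1
          · simp only [if_pos h4]
            rw [sum_map_if_filter (fun j => j ≠ i ∧ pvAt graph i j = 1)]
            rfl
          · simp [h4]
        · simp [h3]
      · simp [h2]
    · simp [h1]
  unfold sumA
  calc ((pvRg graph).map fun j => ((pvRg graph).map fun k => ((pvRg graph).map fun l =>
          ((pvRg graph).map fun m => indA graph i j k l m).sum).sum).sum).sum
      = ((pvRg graph).map fun k => ((pvRg graph).map fun j => ((pvRg graph).map fun l =>
          ((pvRg graph).map fun m => indA graph i j k l m).sum).sum).sum).sum :=
        sum_map_swap _ _ _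
    _ = ((pvRg graph).map fun k => ((pvRg graph).map fun l => ((pvRg graph).map fun j =>
          ((pvRg graph).map fun m => indA graph i j k l m).sum).sum).sum).sum :=
        sum_map_congr fun k _ => sum_map_swap _ _ _
    _ = ((pvRg graph).map fun k => ((pvRg graph).map fun l => ((pvRg graph).map fun m =>
          ((pvRg graph).map fun j => indA graph i j k l m).sum).sum).sum).sum :=
        sum_map_congr fun k _ => sum_map_congr fun l _ => sum_map_swap _ _ _
    _ = ((pvRg graph).map fun k => ((pvRg graph).map fun l => ((pvRg graph).map fun m =>
          if k ≠ i ∧ pvAt graph i k = 1 then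
            if l ≠ i ∧ pvAt graph i l = 1 then
              if m ≠ i ∧ pvAt graph i m = 1 then
                if k ≠ l ∧ k ≠ m ∧ l ≠ m ∧ pvAt graph k l = 1 ∧ pvAt graph k m = 1 ∧
                    pvAt graph l m = 1 then
                  ((pvNbrs graph i).map fun j =>
                    if j ≠ k ∧ j ≠ l ∧ j ≠ m then (1 : Int) else 0).sum
                else 0
              else 0
            else 0
          else 0).sum).sum).sum :=
        sum_map_congr fun k _ => sum_map_congr fun l _ => sum_map_congr fun m _ => hj k l m
    _ = ((pvNbrs graph i).map fun k => ((pvNbrs graph i).map fun l =>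
          ((pvNbrs graph i).map fun m =>
            if k ≠ l ∧ k ≠ m ∧ l ≠ m ∧ pvAt graph k l = 1 ∧ pvAt graph k m = 1 ∧
                pvAt graph l m = 1 then
              ((pvNbrs graph i).map fun j =>
                if j ≠ k ∧ j ≠ l ∧ j ≠ m then (1 : Int) else 0).sum
            else 0).sum).sum).sum :=
        sum3_filter (pvRg graph) (pvNbrs graph i)
          (fun v => v ≠ i ∧ pvAt graph i v = 1) rfl _
    _ = sumB graph i := by
        unfold sumB
        refine sum_map_congr fun k hk => sum_map_congr fun l hl => sum_map_congr fun m hm => ?_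
        by_cases h4 : k ≠ l ∧ k ≠ m ∧ l ≠ m ∧ pvAt graph k l = 1 ∧ pvAt graph k m = 1 ∧
            pvAt graph l m = 1
        · rw [if_pos h4]
          have hcount : ((pvNbrs graph i).map fun j =>
              if j ≠ k ∧ j ≠ l ∧ j ≠ m then (1 : Int) else 0).sum
              = ((pvNbrs graph i).length : Int) - 3 := by
            rw [sum_map_if_filter (fun j => j ≠ k ∧ j ≠ l ∧ j ≠ m), sum_map_one]
            exact count3 (nbrs_nodup graph i) hk hl hm h4.1 h4.2.1 h4.2.2.1
          rw [hcount]
          simp only [indB]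
          generalize pvAt graph k l = e at h4 ⊢
          generalize pvAt graph k m = f at h4 ⊢
          generalize pvAt graph l m = g at h4 ⊢
          split_ifs <;> omega
        · rw [if_neg h4]
          simp only [indB]
          generalize pvAt graph k l = e at h4 ⊢
          generalize pvAt graph k m = f at h4 ⊢
          generalize pvAt graph l m = g at h4 ⊢
          split_ifs <;> omega

lemma small_case (graph : List (List Int)) (h : (graph.length : Int) < 5) :
    internal graph = internal_alt graph := by
  have hz : ∀ i ∈ pvRg graph, sumB graph i = 0 := by
    intro i hi
    have hb : ∀ k ∈ pvNbrs graph i, ∀ l ∈ pvNbrs graph i, ∀ m ∈ pvNbrs graph i,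
        indB graph ((pvNbrs graph i).length : Int) k l m = 0 := by
      intro k hk l hl m hm
      simp only [indB]
      split_ifs with h1 h2
      · -- a directed triangle among the neighbours exists: then |nbrs| = 3 and d - 3 = 0
        have h3 : 3 ≤ (pvNbrs graph i).length := by
          have hlk : l ≠ k := h1.1
          have hmk : m ≠ k := h2.1
          have hml : m ≠ l := h2.2.1
          exact three_le_length hk hl hm (Ne.symm hlk) (Ne.symm hmk) (Ne.symm hml)
        have h4 : (pvNbrs graph i).length ≤ 3 := by
          have hsub : (pvNbrs graph i).Subperm ((pvRg graph).filter fun v => decide (v ≠ i)) := by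
            apply List.subperm_of_subset (nbrs_nodup graph i)
            intro x hx
            rcases List.mem_filter.mp hx with ⟨hxr, hxp⟩
            refine List.mem_filter.mpr ⟨hxr, ?_⟩
            have := of_decide_eq_true hxp
            exact decide_eq_true this.1
          have hle := hsub.length_le
          have hfl : ((pvRg graph).filter fun v => decide (v ≠ i)).length
              = (pvRg graph).length - 1 :=
            filter_ne_length (PySem.List.nodup_pyRange_one _ _) hi
          have hrl : (pvRg graph).length = graph.length := by
            unfold pvRg
            rw [PySem.List.length_pyRange_one]
            omega
          omega
        omega
      · rfl
      · rfl
    unfold sumB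
    rw [sum_map_congr fun k hk => sum_map_congr fun l hl =>
      sum_map_congr fun m hm => hb k hk l hl m hm]
    simp
  have ha : internal graph = 0 := by
    rw [internal_eq, sum_map_congr fun i hi => (core graph i).trans (hz i hi)]
    simp
  have hb : internal_alt graph = 0 := by
    unfold internal_alt
    rw [if_pos h]
  rw [ha, hb]

-- ===== VERDICT (by name: the statement is the Claim_ definition above) =====
theorem internal_spec : Claim_equal_internal := by
  intro graph _ _
  unfold Spec_internal
  by_cases h5 : (graph.length : Int) < 5
  · exact small_case graph h5
  · rw [internal_eq, internal_alt_eq graph h5]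
    exact congrArg List.sum (List.map_congr_left fun i _ => core graph i)
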